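-- pv_equiv track=rewrite | github.com/sinoyuco/leetcode_solutions | array/count_freqs.py | countSignals
-- ===== SOURCE A (Python) =====
-- def countSignals(frequencies, filterRanges):
--     # Write your code here
--     res = 0
--     for s in frequencies:
--         n = True
--         for i in range(len(filterRanges)):
--             filt = filterRanges[i]
--             if s < filt[0] or s > filt[1]:
--                 n = False
--                 break
--         if n:
--             res += 1
--     return res
-- ===== SOURCE B (Python) =====
-- def countSignals(frequencies, filterRanges):
--     if not filterRanges:
--         return len(frequencies)
--     lo = max(r[0] for r in filterRanges)
--     hi = min(r[1] for r in filterRanges)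
--     return sum(1 for s in frequencies if lo <= s <= hi)
-- ===== Notes on version B (the rewrite author's own statement) =====
-- stated objective: faster
-- what changed: B intersects all filter ranges once into [max lower, min upper] and counts frequencies in that single interval, instead of rescanning every range for every frequency.
-- outside the precondition, e.g. on countSignals([0], [[1]]): A returns 0, B raises IndexError
import Mathlib
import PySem

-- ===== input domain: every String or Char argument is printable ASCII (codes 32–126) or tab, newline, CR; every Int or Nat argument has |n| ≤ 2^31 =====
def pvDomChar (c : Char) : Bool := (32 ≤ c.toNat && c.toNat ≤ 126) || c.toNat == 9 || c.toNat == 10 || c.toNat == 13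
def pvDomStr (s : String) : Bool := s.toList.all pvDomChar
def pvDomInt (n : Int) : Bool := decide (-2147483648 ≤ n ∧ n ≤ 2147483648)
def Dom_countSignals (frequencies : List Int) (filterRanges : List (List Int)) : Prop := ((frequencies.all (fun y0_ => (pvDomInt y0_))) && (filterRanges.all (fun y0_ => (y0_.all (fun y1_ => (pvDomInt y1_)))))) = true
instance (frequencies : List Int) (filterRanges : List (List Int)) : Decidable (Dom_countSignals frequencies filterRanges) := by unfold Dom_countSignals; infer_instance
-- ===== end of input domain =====

-- B intersects all filter ranges once into [max lower, min upper] and counts frequencies in that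
-- single interval (O(F+R)) instead of rescanning every range for every frequency (O(F*R)).


-- ===== PORT A =====
-- inner 'for i in range(len(filterRanges))' loop with break: structural recursion over the list,
-- filt[0]/filt[1] via pyGet? (the .getD 0 default is never reached under Pre_countSignals)
def pvAInner (s : Int) : List (List Int) → Bool
  | [] => true
  | filt :: rest =>
    if s < (PySem.List.pyGet? filt 0).getD 0 then false
    else if (PySem.List.pyGet? filt 1).getD 0 < s then false
    else pvAInner s rest

def countSignals (frequencies : List Int) (filterRanges : List (List Int)) : Int :=
  frequencies.foldl (fun res s => if pvAInner s filterRanges then res + 1 else res) 0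

-- ===== PORT B =====
def countSignals_alt (frequencies : List Int) (filterRanges : List (List Int)) : Int :=
  if filterRanges.isEmpty then (frequencies.length : Int)
  else
    let lo := ((filterRanges.map fun r => (PySem.List.pyGet? r 0).getD 0).max?).getD 0
    let hi := ((filterRanges.map fun r => (PySem.List.pyGet? r 1).getD 0).min?).getD 0
    ((frequencies.filter fun s => decide (lo ≤ s) && decide (s ≤ hi)).length : Int)

-- ===== PRECONDITION & SPEC =====
-- Pre_ excludes exactly the inputs on which Python can raise IndexError: a filter range with
-- fewer than 2 elements (A still returns when short-circuiting skips the bad access; B raises there).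
def Pre_countSignals (frequencies : List Int) (filterRanges : List (List Int)) : Prop :=
  ∀ r ∈ filterRanges, 2 ≤ r.length
instance (frequencies : List Int) (filterRanges : List (List Int)) : Decidable (Pre_countSignals frequencies filterRanges) := by unfold Pre_countSignals; infer_instance

def pvWitness_countSignals : List Int × List (List Int) := ([1, 3, 5], [[1, 4], [2, 6]])

def Spec_countSignals (frequencies : List Int) (filterRanges : List (List Int)) (out : Int) : Prop := out = countSignals_alt frequencies filterRanges
instance (frequencies : List Int) (filterRanges : List (List Int)) (out : Int) : Decidable (Spec_countSignals frequencies filterRanges out) := by unfold Spec_countSignals; infer_instance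

-- ===== CLAIM (what is proved, stated in full; the proofs are below) =====
def Claim_equal_countSignals : Prop := ∀ (frequencies : List Int) (filterRanges : List (List Int)), Dom_countSignals frequencies filterRanges → Pre_countSignals frequencies filterRanges → Spec_countSignals frequencies filterRanges (countSignals frequencies filterRanges)

-- ===== LEMMAS AND PROOFS =====
lemma pvAInner_iff (s : Int) (rs : List (List Int)) :
    pvAInner s rs = true ↔
      ∀ r ∈ rs, (PySem.List.pyGet? r 0).getD 0 ≤ s ∧ s ≤ (PySem.List.pyGet? r 1).getD 0 := by
  induction rs with
  | nil => simp [pvAInner]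
  | cons r rest ih =>
    simp only [pvAInner, List.mem_cons]
    split_ifs with h1 h2
    · simp only [false_iff]
      intro hco
      exact absurd (hco r (Or.inl rfl)).1 (by omega)
    · simp only [false_iff]
      intro hco
      exact absurd (hco r (Or.inl rfl)).2 (by omega)
    · rw [ih]
      constructor
      · rintro h x (rfl | hx)
        · exact ⟨by omega, by omega⟩
        · exact h x hx
      · intro h x hx; exact h x (Or.inr hx)

lemma pvAInner_eq_interval (s : Int) (rs : List (List Int)) (hne : rs ≠ []) :
    pvAInner s rs =
      (decide (((rs.map fun r => (PySem.List.pyGet? r 0).getD 0).max?).getD 0 ≤ s) &&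
       decide (s ≤ ((rs.map fun r => (PySem.List.pyGet? r 1).getD 0).min?).getD 0)) := by
  obtain ⟨lo, hlo⟩ : ∃ lo, (rs.map fun r => (PySem.List.pyGet? r 0).getD 0).max? = some lo := by
    cases h : (rs.map fun r => (PySem.List.pyGet? r 0).getD 0).max? with
    | none => exact absurd (List.max?_eq_none_iff.mp h) (by simpa using hne)
    | some lo => exact ⟨lo, rfl⟩
  obtain ⟨hi, hhi⟩ : ∃ hi, (rs.map fun r => (PySem.List.pyGet? r 1).getD 0).min? = some hi := by
    cases h : (rs.map fun r => (PySem.List.pyGet? r 1).getD 0).min? with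
    | none => exact absurd (List.min?_eq_none_iff.mp h) (by simpa using hne)
    | some hi => exact ⟨hi, rfl⟩
  rw [hlo, hhi]
  simp only [Option.getD_some]
  rcases Bool.eq_false_or_eq_true (pvAInner s rs) with h | h <;> rw [h] <;> symm
  · have hall := (pvAInner_iff s rs).mp h
    rw [Bool.and_eq_true, decide_eq_true_iff, decide_eq_true_iff]
    constructor
    · exact (List.max?_le_iff hlo).mpr (by
        intro b hb
        obtain ⟨r, hr, rfl⟩ := List.mem_map.mp hb
        exact (hall r hr).1)
    · exact (List.le_min?_iff hhi).mpr (by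
        intro b hb
        obtain ⟨r, hr, rfl⟩ := List.mem_map.mp hb
        exact (hall r hr).2)
  · rw [Bool.and_eq_false_iff]
    by_contra hcon
    push Not at hcon
    have h1 : lo ≤ s := by
      have := hcon.1; simpa using this
    have h2 : s ≤ hi := by
      have := hcon.2; simpa using this
    have hall : ∀ r ∈ rs, (PySem.List.pyGet? r 0).getD 0 ≤ s ∧ s ≤ (PySem.List.pyGet? r 1).getD 0 := by
      intro r hr
      constructor
      · exact (List.max?_le_iff hlo).mp h1 _ (List.mem_map_of_mem hr)
      · exact (List.le_min?_iff hhi).mp h2 _ (List.mem_map_of_mem hr)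
    rw [(pvAInner_iff s rs).mpr hall] at h
    simp at h

-- ===== VERDICT (by name: the statement is the Claim_ definition above) =====
theorem countSignals_spec : Claim_equal_countSignals := by
  intro freqs rs _ _
  unfold Spec_countSignals countSignals countSignals_alt
  by_cases hne : rs = []
  · subst hne
    simp only [List.isEmpty_nil, if_true]
    have : ∀ s : Int, pvAInner s ([] : List (List Int)) = true := fun _ => rfl
    rw [show (fun (res : Int) (s : Int) => if pvAInner s ([] : List (List Int)) then res + 1 else res)
          = fun res s => if (fun _ : Int => true) s then res + 1 else res from rfl]
    rw [PySem.List.foldl_count_if]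
    simp [List.countP_true]
  · rw [if_neg (by simpa using hne)]
    have hfun : (fun (res : Int) (s : Int) => if pvAInner s rs then res + 1 else res)
        = fun res s => if ((decide (((rs.map fun r => (PySem.List.pyGet? r 0).getD 0).max?).getD 0 ≤ s) &&
             decide (s ≤ ((rs.map fun r => (PySem.List.pyGet? r 1).getD 0).min?).getD 0))) then res + 1 else res := by
      funext res s
      rw [pvAInner_eq_interval s rs hne]
    rw [hfun, PySem.List.foldl_count_if]
    simp [List.countP_eq_length_filter]
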